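-- pv_equiv track=rewrite | github.com/Radar-Lei/SignalClaw | evoprog/evaluator/event_detector.py | _find_phase_for_lane
-- ===== SOURCE A (Python) =====
-- def _find_phase_for_lane(
--     lane_id: str,
--     unique_lanes: list[str],
--     lane_links_per_move: list[list[tuple[int, int]]],
--     phase_move_map: list[list[int]],
-- ) -> int:
--     """找到包含指定车道的相位编号。
--
--     通过 lane_id -> lane_idx -> 包含该 lane_idx 的 move -> 包含该 move 的 phase。
--
--     Returns:
--         相位编号（从 0 开始），找不到时返回 -1
--     """
--     if lane_id not in unique_lanes:
--         return -1
--
--     lane_idx = unique_lanes.index(lane_id)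
--
--     # 找到包含该 lane 的所有 move
--     target_moves = set()
--     for move_id, links in enumerate(lane_links_per_move):
--         for in_idx, out_idx in links:
--             if in_idx == lane_idx or out_idx == lane_idx:
--                 target_moves.add(move_id)
--
--     # 找到包含这些 move 的相位
--     for phase_id, move_ids in enumerate(phase_move_map):
--         if target_moves & set(move_ids):
--             return phase_id
--
--     return -1
-- ===== SOURCE B (Python) =====
-- def _find_phase_for_lane(
--     lane_id: str,
--     unique_lanes: list[str],
--     lane_links_per_move: list[list[tuple[int, int]]],
--     phase_move_map: list[list[int]],
-- ) -> int:
--     """Inverted search: build a move_id -> first phase dictionary once, then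
--     scan the moves and take the minimum first-phase over moves containing
--     the lane."""
--     if lane_id not in unique_lanes:
--         return -1
--     lane_idx = unique_lanes.index(lane_id)
--
--     first_phase = {}
--     for phase_id, move_ids in enumerate(phase_move_map):
--         for m in move_ids:
--             if m not in first_phase:
--                 first_phase[m] = phase_id
--
--     best = -1
--     for move_id, links in enumerate(lane_links_per_move):
--         if move_id in first_phase and any(a == lane_idx or b == lane_idx for a, b in links):
--             p = first_phase[move_id]
--             if best == -1 or p < best:
--                 best = p
--     return best
-- ===== Notes on version B (the rewrite author's own statement) =====
-- stated objective: alternative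
-- what changed: B inverts the search: instead of A's precomputed target-move set and per-phase set intersections with early return, B builds a move_id -> first-phase dictionary in one pass over phases and then scans lane_links_per_move once, returning the minimum first-phase over moves that contain the lane.
import Mathlib
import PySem

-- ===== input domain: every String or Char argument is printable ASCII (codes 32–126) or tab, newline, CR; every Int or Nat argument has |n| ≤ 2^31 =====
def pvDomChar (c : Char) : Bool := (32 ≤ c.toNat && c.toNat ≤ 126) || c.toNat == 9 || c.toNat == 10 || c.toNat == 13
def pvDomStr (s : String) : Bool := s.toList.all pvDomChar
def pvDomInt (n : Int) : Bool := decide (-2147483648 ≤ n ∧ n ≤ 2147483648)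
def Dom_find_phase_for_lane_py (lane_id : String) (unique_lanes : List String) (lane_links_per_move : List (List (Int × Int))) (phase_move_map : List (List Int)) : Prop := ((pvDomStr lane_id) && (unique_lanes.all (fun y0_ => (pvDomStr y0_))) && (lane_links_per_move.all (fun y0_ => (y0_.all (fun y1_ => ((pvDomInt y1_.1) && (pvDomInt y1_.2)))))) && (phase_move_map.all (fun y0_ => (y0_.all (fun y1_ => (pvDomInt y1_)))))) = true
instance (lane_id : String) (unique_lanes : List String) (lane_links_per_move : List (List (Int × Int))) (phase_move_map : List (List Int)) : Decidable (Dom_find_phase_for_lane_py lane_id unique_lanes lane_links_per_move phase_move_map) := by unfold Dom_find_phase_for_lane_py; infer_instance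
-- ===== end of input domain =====

-- B inverts the search: a move_id -> first-phase dictionary built in one pass over phases,
-- then one scan of the moves taking the minimum first-phase over moves containing the lane;
-- same return value as A's target-move set + per-phase intersection scan (objective: alternative).

-- ===== PORT A =====
-- target_moves: fold over enumerate(lane_links_per_move), inner fold over links
def pvATarget (lane_idx : Int) (llpm : List (List (Int × Int))) : PySem.Set Int :=
  (PySem.List.enumerate llpm 0).foldl
    (fun tm p => p.2.foldl
      (fun tm l => if l.1 == lane_idx || l.2 == lane_idx then PySem.Set.add tm p.1 else tm) tm)
    PySem.Set.empty

-- the second for-loop with its early return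
def pvALoop (target : PySem.Set Int) : List (Int × List Int) → Int
  | [] => -1
  | (pid, mids) :: rest =>
    if (PySem.Set.inter target (PySem.Set.ofList mids)).isEmpty then pvALoop target rest
    else pid

def find_phase_for_lane_py (lane_id : String) (unique_lanes : List String) (lane_links_per_move : List (List (Int × Int))) (phase_move_map : List (List Int)) : Int :=
  if lane_id ∉ unique_lanes then -1
  else
    match PySem.List.index? unique_lanes lane_id with
    | none => -1  -- unreachable: lane_id ∈ unique_lanes
    | some lane_idx =>
      pvALoop (pvATarget (lane_idx : Int) lane_links_per_move)
        (PySem.List.enumerate phase_move_map 0)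

-- ===== PORT B =====
-- first_phase: dict move_id -> id of the first phase containing it ("if m not in d: d[m] = phase_id")
def pvFirstPhase (phases : List (Int × List Int)) : PySem.Dict Int Int :=
  phases.foldl
    (fun d p => p.2.foldl (fun d m => if d.contains m then d else d.insert m p.1) d)
    PySem.Dict.empty

-- loop body of B's scan over enumerate(lane_links_per_move), accumulator best
def pvStep (lane_idx : Int) (fp : PySem.Dict Int Int) (best : Int) (p : Int × List (Int × Int)) : Int :=
  if fp.contains p.1 && p.2.any (fun l => l.1 == lane_idx || l.2 == lane_idx) then
    match fp.get? p.1 with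
    | none => best  -- unreachable: guarded by contains
    | some q => if best == -1 || q < best then q else best
  else best

def find_phase_for_lane_py_alt (lane_id : String) (unique_lanes : List String) (lane_links_per_move : List (List (Int × Int))) (phase_move_map : List (List Int)) : Int :=
  if lane_id ∉ unique_lanes then -1
  else
    match PySem.List.index? unique_lanes lane_id with
    | none => -1  -- unreachable: lane_id ∈ unique_lanes
    | some lane_idx =>
      (PySem.List.enumerate lane_links_per_move 0).foldl
        (pvStep lane_idx (pvFirstPhase (PySem.List.enumerate phase_move_map 0))) (-1)

-- ===== PRECONDITION & SPEC =====
def Spec_find_phase_for_lane_py (lane_id : String) (unique_lanes : List String) (lane_links_per_move : List (List (Int × Int))) (phase_move_map : List (List Int)) (out : Int) : Prop := out = find_phase_for_lane_py_alt lane_id unique_lanes lane_links_per_move phase_move_map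
instance (lane_id : String) (unique_lanes : List String) (lane_links_per_move : List (List (Int × Int))) (phase_move_map : List (List Int)) (out : Int) : Decidable (Spec_find_phase_for_lane_py lane_id unique_lanes lane_links_per_move phase_move_map out) := by unfold Spec_find_phase_for_lane_py; infer_instance

-- ===== CLAIM (what is proved, stated in full; the proofs are below) =====
def Claim_equal_find_phase_for_lane_py : Prop := ∀ (lane_id : String) (unique_lanes : List String) (lane_links_per_move : List (List (Int × Int))) (phase_move_map : List (List Int)), Dom_find_phase_for_lane_py lane_id unique_lanes lane_links_per_move phase_move_map → Spec_find_phase_for_lane_py lane_id unique_lanes lane_links_per_move phase_move_map (find_phase_for_lane_py lane_id unique_lanes lane_links_per_move phase_move_map)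

-- ===== LEMMAS AND PROOFS =====

-- does move id m (an Int) denote a move whose links touch lane_idx?
def pvHit (lane_idx : Int) (llpm : List (List (Int × Int))) (m : Int) : Bool :=
  (decide (0 ≤ m) && decide (m < (llpm.length : Int))) &&
    (PySem.List.pyGetD llpm m []).any (fun l => l.1 == lane_idx || l.2 == lane_idx)

-- first index in a list satisfying a predicate (proof-side tool)
def pvFirstIdx {α : Type} (c : α → Bool) : List α → Option Nat
  | [] => none
  | x :: xs => if c x then some 0 else (pvFirstIdx c xs).map (· + 1)

theorem pvFirstIdx_eq_none {α : Type} (c : α → Bool) (l : List α) :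
    pvFirstIdx c l = none ↔ ∀ x ∈ l, c x = false := by
  induction l with
  | nil => simp [pvFirstIdx]
  | cons x xs ih =>
    by_cases h : c x = true
    · simp [pvFirstIdx, h]
    · simp only [Bool.not_eq_true] at h
      simp [pvFirstIdx, h, ih]

theorem pvFirstIdx_eq_some {α : Type} (c : α → Bool) (l : List α) (j : Nat)
    (h : pvFirstIdx c l = some j) :
    ∃ hj : j < l.length, c l[j] = true := by
  induction l generalizing j with
  | nil => simp [pvFirstIdx] at h
  | cons x xs ih =>
    by_cases hx : c x = true
    · simp [pvFirstIdx, hx] at h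
      subst h
      exact ⟨by simp, by simpa using hx⟩
    · simp only [Bool.not_eq_true] at hx
      simp [pvFirstIdx, hx] at h
      obtain ⟨j', hj', rfl⟩ := h
      obtain ⟨hlt, hc⟩ := ih j' hj'
      exact ⟨by simpa using Nat.succ_lt_succ hlt, by simpa using hc⟩

theorem pvFirstIdx_isSome {α : Type} (c : α → Bool) (l : List α) (x : α)
    (hm : x ∈ l) (hc : c x = true) : (pvFirstIdx c l).isSome := by
  cases h : pvFirstIdx c l with
  | some j => simp
  | none =>
    rw [pvFirstIdx_eq_none] at h
    simp [h x hm] at hc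

-- minimality: any index where the predicate holds is ≥ the found one
theorem pvFirstIdx_le {α : Type} (c : α → Bool) (l : List α) (j i : Nat)
    (h : pvFirstIdx c l = some j) (hi : i < l.length) (hci : c l[i] = true) : j ≤ i := by
  induction l generalizing j i with
  | nil => simp [pvFirstIdx] at h
  | cons x xs ih =>
    by_cases hx : c x = true
    · simp [pvFirstIdx, hx] at h
      omega
    · simp only [Bool.not_eq_true] at hx
      simp [pvFirstIdx, hx] at h
      obtain ⟨j', hj', rfl⟩ := h
      cases i with
      | zero => simp [hx] at hci
      | succ i =>
        have := ih j' i hj' (by simpa using hi) (by simpa using hci)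
        omega

-- membership in the inner fold over one move's links (A's target set)
theorem pv_mem_inner (lane_idx j m : Int) (links : List (Int × Int)) (tm : PySem.Set Int) :
    m ∈ links.foldl
      (fun tm l => if l.1 == lane_idx || l.2 == lane_idx then PySem.Set.add tm j else tm) tm ↔
    m ∈ tm ∨ (m = j ∧ ∃ l ∈ links, (l.1 == lane_idx || l.2 == lane_idx) = true) := by
  induction links generalizing tm with
  | nil => simp
  | cons l ls ih =>
    simp only [List.foldl_cons]
    by_cases h : (l.1 == lane_idx || l.2 == lane_idx) = true
    · rw [if_pos h, ih]
      simp only [beq_iff_eq, Bool.or_eq_true] at h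
      simp [PySem.Set.mem_add]
      tauto
    · rw [if_neg h, ih]
      simp only [beq_iff_eq, Bool.or_eq_true, not_or] at h
      simp [h.1, h.2]

-- membership in target_moves
theorem pv_mem_target (lane_idx m : Int) (llpm : List (List (Int × Int))) (s : Int)
    (tm : PySem.Set Int) :
    m ∈ (PySem.List.enumerate llpm s).foldl
      (fun tm p => p.2.foldl
        (fun tm l => if l.1 == lane_idx || l.2 == lane_idx then PySem.Set.add tm p.1 else tm) tm)
      tm ↔
    m ∈ tm ∨ ∃ k : Nat, ∃ h : k < llpm.length, m = s + k ∧
      ∃ l ∈ llpm[k], (l.1 == lane_idx || l.2 == lane_idx) = true := by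
  induction llpm generalizing s tm with
  | nil => simp [PySem.List.enumerate_nil]
  | cons x xs ih =>
    rw [PySem.List.enumerate_cons]
    simp only [List.foldl_cons]
    rw [ih, pv_mem_inner]
    constructor
    · rintro (((h | ⟨rfl, l, hl, hh⟩) ) | ⟨k, hk, rfl, l, hl, hh⟩)
      · exact Or.inl h
      · exact Or.inr ⟨0, by simp, by simp, l, hl, hh⟩
      · exact Or.inr ⟨k + 1, by simpa using hk, by push_cast; ring_nf, l, by simpa using hl, hh⟩
    · rintro (h | ⟨k, hk, rfl, l, hl, hh⟩)
      · exact Or.inl (Or.inl h)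
      · cases k with
        | zero => exact Or.inl (Or.inr ⟨by simp, l, by simpa using hl, hh⟩)
        | succ k =>
          exact Or.inr ⟨k, by simpa using hk, by push_cast; ring_nf, l, by simpa using hl, hh⟩

-- m ∈ target_moves ↔ pvHit m
theorem pv_mem_target_iff (lane_idx m : Int) (llpm : List (List (Int × Int))) :
    m ∈ pvATarget lane_idx llpm ↔ pvHit lane_idx llpm m = true := by
  unfold pvATarget pvHit
  rw [pv_mem_target]
  simp only [PySem.Set.empty, List.not_mem_nil, false_or]
  constructor
  · rintro ⟨k, hk, rfl, l, hl, hh⟩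
    have h0 : (0 : Int) ≤ (k : Int) := by positivity
    simp only [zero_add] at *
    rw [PySem.List.pyGetD_natCast]
    simp only [decide_eq_true_eq, Bool.and_eq_true, List.any_eq_true]
    refine ⟨⟨by positivity, by omega⟩, l, ?_, hh⟩
    simpa [List.getD, hk] using hl
  · intro h
    simp only [Bool.and_eq_true, decide_eq_true_eq, List.any_eq_true] at h
    obtain ⟨⟨h0, hlt⟩, l, hl, hh⟩ := h
    refine ⟨m.toNat, by omega, by omega, l, ?_, hh⟩
    have : m = ((m.toNat : Nat) : Int) := by omega
    rw [this, PySem.List.pyGetD_natCast] at hl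
    simpa [List.getD, show m.toNat < llpm.length by omega] using hl

-- A's per-phase condition in terms of pvHit
theorem pv_cond (lane_idx : Int) (llpm : List (List (Int × Int))) (mids : List Int) :
    (PySem.Set.inter (pvATarget lane_idx llpm) (PySem.Set.ofList mids)).isEmpty =
      !(mids.any (pvHit lane_idx llpm)) := by
  rcases h : mids.any (pvHit lane_idx llpm) with _ | _
  · simp only [Bool.not_false]
    rw [List.isEmpty_iff, List.eq_nil_iff_forall_not_mem]
    intro x hx
    rw [PySem.Set.mem_inter] at hx
    obtain ⟨hxt, hxm⟩ := hx
    rw [PySem.Set.mem_ofList] at hxm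
    have := List.any_eq_false.mp (by simpa using h) x hxm
    exact this ((pv_mem_target_iff lane_idx x llpm).mp hxt)
  · simp only [Bool.not_true]
    obtain ⟨x, hxm, hxh⟩ := List.any_eq_true.mp h
    rw [List.isEmpty_eq_false_iff]
    intro hnil
    have : x ∈ PySem.Set.inter (pvATarget lane_idx llpm) (PySem.Set.ofList mids) := by
      rw [PySem.Set.mem_inter, PySem.Set.mem_ofList]
      exact ⟨(pv_mem_target_iff lane_idx x llpm).mpr hxh, hxm⟩
    simp [hnil] at this

-- A's phase loop returns the first index whose mids contain a hitting move
theorem pv_aloop_char (lane_idx : Int) (llpm : List (List (Int × Int)))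
    (phases : List (List Int)) (s : Int) :
    pvALoop (pvATarget lane_idx llpm) (PySem.List.enumerate phases s) =
      match pvFirstIdx (fun mids => mids.any (pvHit lane_idx llpm)) phases with
      | none => -1
      | some j => s + j := by
  induction phases generalizing s with
  | nil => simp [PySem.List.enumerate_nil, pvALoop, pvFirstIdx]
  | cons mids rest ih =>
    rw [PySem.List.enumerate_cons]
    simp only [pvALoop, pv_cond, pvFirstIdx]
    by_cases h : mids.any (pvHit lane_idx llpm) = true
    · simp [h]
    · simp only [Bool.not_eq_true] at h
      simp only [h, Bool.not_false, Bool.false_eq_true, if_true, if_false, ih (s + 1)]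
      cases pvFirstIdx (fun mids => mids.any (pvHit lane_idx llpm)) rest with
      | none => simp
      | some j => simp; ring

-- the first-phase dict: inner fold over one phase's move ids
theorem pv_fp_inner (mids : List Int) (pid : Int) (d : PySem.Dict Int Int) (m : Int) :
    (mids.foldl (fun d x => if d.contains x then d else d.insert x pid) d).get? m =
      if (d.get? m).isSome then d.get? m
      else if m ∈ mids then some pid else none := by
  induction mids generalizing d with
  | nil => cases h : d.get? m <;> simp [h]
  | cons x xs ih =>
    simp only [List.foldl_cons]
    by_cases hc : d.contains x = true
    · rw [if_pos hc, ih]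
      by_cases hs : (d.get? m).isSome
      · simp [hs]
      · rw [if_neg hs, if_neg hs]
        have hmx : m ≠ x := by
          rintro rfl
          rw [PySem.Dict.contains_eq_isSome_get?] at hc
          exact hs hc
        simp [hmx]
    · rw [if_neg hc, ih]
      by_cases hmx : m = x
      · subst hmx
        have hnone : d.get? m = none := by
          cases h : d.get? m with
          | none => rfl
          | some v => rw [PySem.Dict.contains_eq_isSome_get?, h] at hc; simp at hc
        rw [PySem.Dict.get?_insert_self]
        simp [hnone]
      · rw [PySem.Dict.get?_insert]
        simp [hmx]

-- the first-phase dict: lookup = first phase (from start index s) containing the move id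
theorem pv_fp_get (phases : List (List Int)) (s : Int) (d : PySem.Dict Int Int) (m : Int) :
    ((PySem.List.enumerate phases s).foldl
      (fun d p => p.2.foldl (fun d x => if d.contains x then d else d.insert x p.1) d) d).get? m =
      if (d.get? m).isSome then d.get? m
      else (pvFirstIdx (fun mids => decide (m ∈ mids)) phases).map (fun j => s + (j : Int)) := by
  induction phases generalizing s d with
  | nil =>
    rw [PySem.List.enumerate_nil]
    simp only [List.foldl_nil, pvFirstIdx]
    cases h : d.get? m <;> simp [h]
  | cons mids rest ih =>
    rw [PySem.List.enumerate_cons]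
    simp only [List.foldl_cons, pvFirstIdx]
    rw [ih, pv_fp_inner]
    by_cases hs : (d.get? m).isSome
    · simp [hs]
    · have hnone : d.get? m = none := Option.not_isSome_iff_eq_none.mp hs
      by_cases hm : m ∈ mids
      · simp [hnone, hm]
      · simp only [hnone, hm, Option.isSome_none, Bool.false_eq_true, if_false, decide_false]
        cases pvFirstIdx (fun mids => decide (m ∈ mids)) rest with
        | none => simp
        | some j => simp; ring

theorem pv_fp0_get (phases : List (List Int)) (m : Int) :
    (pvFirstPhase (PySem.List.enumerate phases 0)).get? m =
      (pvFirstIdx (fun mids => decide (m ∈ mids)) phases).map (fun j => (j : Int)) := by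
  unfold pvFirstPhase
  rw [pv_fp_get]
  cases h : pvFirstIdx (fun mids => decide (m ∈ mids)) phases <;>
    simp [PySem.Dict.get?_empty, h]

-- B's step in terms of an optional candidate value
def pvCand (lane_idx : Int) (fp : PySem.Dict Int Int) (p : Int × List (Int × Int)) : Option Int :=
  if fp.contains p.1 && p.2.any (fun l => l.1 == lane_idx || l.2 == lane_idx) then fp.get? p.1
  else none

def pvOmin (best q : Int) : Int := if best == -1 || q < best then q else best

theorem pv_step_eq_cand (lane_idx : Int) (fp : PySem.Dict Int Int) (best : Int)
    (p : Int × List (Int × Int)) :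
    pvStep lane_idx fp best p =
      match pvCand lane_idx fp p with
      | none => best
      | some q => pvOmin best q := by
  unfold pvStep pvCand pvOmin
  by_cases h : (fp.contains p.1 && p.2.any (fun l => l.1 == lane_idx || l.2 == lane_idx)) = true
  · rw [if_pos h, if_pos h]
  · rw [if_neg h, if_neg h]

theorem pv_fold_cand (lane_idx : Int) (fp : PySem.Dict Int Int)
    (l : List (Int × List (Int × Int))) (b : Int) :
    l.foldl (pvStep lane_idx fp) b = (l.filterMap (pvCand lane_idx fp)).foldl pvOmin b := by
  induction l generalizing b with
  | nil => rfl
  | cons p rest ih =>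
    simp only [List.foldl_cons, List.filterMap_cons, pv_step_eq_cand]
    cases pvCand lane_idx fp p with
    | none => exact ih b
    | some q => simp only [List.foldl_cons]; exact ih _

-- folding pvOmin over nonnegative values from a nonnegative start computes a minimum
theorem pv_omin_min (cs : List Int) (h0 : ∀ q ∈ cs, 0 ≤ q) (b : Int) (hb : 0 ≤ b) :
    cs.foldl pvOmin b ∈ b :: cs ∧ cs.foldl pvOmin b ≤ b ∧ ∀ q ∈ cs, cs.foldl pvOmin b ≤ q := by
  induction cs generalizing b with
  | nil => simp
  | cons c cs ih =>
    have hc0 : 0 ≤ c := h0 c (by simp)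
    have hstep : pvOmin b c = if c < b then c else b := by
      unfold pvOmin
      have hne : (b == -1) = false := by simp; omega
      rw [hne, Bool.false_or]
      simp
    have hm0 : 0 ≤ (if c < b then c else b) := by split_ifs <;> omega
    obtain ⟨hmem, hle, hall⟩ := ih (fun q hq => h0 q (by simp [hq])) _ hm0
    rw [List.foldl_cons, hstep]
    refine ⟨?_, ?_, ?_⟩
    · rcases List.mem_cons.mp hmem with h | h
      · rw [h]; split_ifs <;> simp
      · exact List.mem_cons_of_mem _ (List.mem_cons_of_mem _ h)
    · have : (if c < b then c else b) ≤ b := by split_ifs <;> omega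
      omega
    · intro q hq
      rcases List.mem_cons.mp hq with rfl | hq
      · have : (if q < b then q else b) ≤ q := by split_ifs <;> omega
        omega
      · exact hall q hq

theorem pv_omin_neg_one_cons (c : Int) (cs : List Int) :
    (c :: cs).foldl pvOmin (-1) = cs.foldl pvOmin c := by
  simp [pvOmin]

-- candidates of B's scan: each is the (Nat-valued) first phase index of a hitting move
theorem pv_cand_some_iff (lane_idx : Int) (llpm : List (List (Int × Int)))
    (phases : List (List Int)) (p : Int × List (Int × Int)) (q : Int)
    (hp : p ∈ PySem.List.enumerate llpm 0) :
    pvCand lane_idx (pvFirstPhase (PySem.List.enumerate phases 0)) p = some q ↔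
      (pvHit lane_idx llpm p.1 = true ∧
        pvFirstIdx (fun mids => decide (p.1 ∈ mids)) phases = some q.toNat ∧ 0 ≤ q) := by
  obtain ⟨k, hk, rfl⟩ := (PySem.List.mem_enumerate_iff _ _ _).mp hp
  simp only [zero_add]
  unfold pvCand
  rw [PySem.Dict.contains_eq_isSome_get?, pv_fp0_get]
  have hhit : pvHit lane_idx llpm (k : Int) =
      (llpm[k].any (fun l => l.1 == lane_idx || l.2 == lane_idx)) := by
    unfold pvHit
    rw [PySem.List.pyGetD_natCast]
    have h0 : (0 : Int) ≤ (k : Int) := by positivity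
    have h1 : (k : Int) < (llpm.length : Int) := by exact_mod_cast hk
    simp [List.getD, hk, h0, h1]
  cases hfi : pvFirstIdx (fun mids => decide ((k : Int) ∈ mids)) phases with
  | none => simp [hfi, hhit]
  | some j =>
    simp only [hfi, Option.map_some, Option.isSome_some, Bool.true_and]
    by_cases ha : llpm[k].any (fun l => l.1 == lane_idx || l.2 == lane_idx) = true
    · simp only [ha, hhit]
      constructor
      · rintro h
        have hq : q = (j : Int) := by simpa using h.symm
        subst hq
        simp [ha]
      · rintro ⟨_, hj, hq0⟩
        have hqj : q = (j : Int) := by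
          have := Option.some.inj hj
          omega
        simp [hqj]
    · simp only [Bool.not_eq_true] at ha
      simp [ha, hhit]

-- ===== VERDICT (by name: the statement is the Claim_ definition above) =====
theorem find_phase_for_lane_py_spec : Claim_equal_find_phase_for_lane_py := by
  intro lane_id unique_lanes llpm phases _
  unfold Spec_find_phase_for_lane_py find_phase_for_lane_py find_phase_for_lane_py_alt
  by_cases hmem : lane_id ∈ unique_lanes
  · rw [if_neg (by simpa using hmem), if_neg (by simpa using hmem)]
    rcases hidx : PySem.List.index? unique_lanes lane_id with _ | lane_idx
    · rfl
    · -- main case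
      dsimp only
      rw [pv_aloop_char, pv_fold_cand]
      set fp := pvFirstPhase (PySem.List.enumerate phases 0) with hfp
      set cs := (PySem.List.enumerate llpm 0).filterMap (pvCand lane_idx fp) with hcs
      set cA := fun mids : List Int => mids.any (pvHit lane_idx llpm) with hcA
      -- every candidate value comes from a phase whose mids contain a hitting move
      have hcand : ∀ q ∈ cs, ∃ hlt : q.toNat < phases.length, 0 ≤ q ∧
          cA (phases[q.toNat]) = true := by
        intro q hq
        rw [hcs, List.mem_filterMap] at hq
        obtain ⟨p, hp, hpq⟩ := hq
        rw [hfp, pv_cand_some_iff lane_idx llpm phases p q hp] at hpq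
        obtain ⟨hhit, hfi, hq0⟩ := hpq
        obtain ⟨hjlt, hcj⟩ := pvFirstIdx_eq_some _ _ _ hfi
        refine ⟨hjlt, hq0, ?_⟩
        rw [hcA]
        simp only [List.any_eq_true]
        exact ⟨p.1, by simpa using hcj, hhit⟩
      cases hA : pvFirstIdx cA phases with
      | none =>
        -- no phase hits: every candidate is impossible, cs = []
        have : cs = [] := by
          rw [List.eq_nil_iff_forall_not_mem]
          intro q hq
          obtain ⟨hlt, _, hc⟩ := hcand q hq
          rw [pvFirstIdx_eq_none] at hA
          simp [hA _ (List.getElem_mem hlt)] at hc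
        simp [this]
      | some j =>
        -- first hitting phase j: j is a candidate and a lower bound of all candidates
        obtain ⟨hjlt, hcj⟩ := pvFirstIdx_eq_some cA phases j hA
        rw [hcA] at hcj
        obtain ⟨m0, hm0, hhit0⟩ := List.any_eq_true.mp hcj
        have hm0rng : 0 ≤ m0 ∧ m0 < (llpm.length : Int) := by
          unfold pvHit at hhit0
          simp only [Bool.and_eq_true, decide_eq_true_eq] at hhit0
          exact hhit0.1
        -- the candidate produced by move m0
        have hp0 : ((m0.toNat : Int), llpm[m0.toNat]'(by omega)) ∈ PySem.List.enumerate llpm 0 := by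
          rw [PySem.List.mem_enumerate_iff]
          exact ⟨m0.toNat, by omega, by simp⟩
        have hfi0 : (pvFirstIdx (fun mids => decide (m0 ∈ mids)) phases).isSome :=
          pvFirstIdx_isSome _ _ (phases[j]'hjlt) (List.getElem_mem hjlt) (by simpa using hm0)
        obtain ⟨j0, hj0⟩ := Option.isSome_iff_exists.mp hfi0
        have hj0le : j0 ≤ j := pvFirstIdx_le _ phases j0 j hj0 hjlt (by simpa using hm0)
        have hcast : ((m0.toNat : Int)) = m0 := by omega
        have hmem0 : ((j0 : Int)) ∈ cs := by
          rw [hcs, List.mem_filterMap]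
          refine ⟨_, hp0, ?_⟩
          rw [hfp, pv_cand_some_iff lane_idx llpm phases _ _ hp0]
          refine ⟨by simpa [hcast] using hhit0, ?_, by positivity⟩
          simpa [hcast] using hj0
        -- every candidate is ≥ j
        have hlb : ∀ q ∈ cs, (j : Int) ≤ q := by
          intro q hq
          obtain ⟨hlt, hq0, hc⟩ := hcand q hq
          have := pvFirstIdx_le cA phases j q.toNat hA hlt hc
          omega
        have hj0j : j0 = j := by
          have := hlb _ hmem0
          omega
        rw [hj0j] at hmem0
        -- cs is nonempty; fold the minimum
        cases hcse : cs with
        | nil => rw [hcse] at hmem0; simp at hmem0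
        | cons c cs' =>
          rw [pv_omin_neg_one_cons]
          have h0all : ∀ q ∈ cs, 0 ≤ q := fun q hq => (hcand q hq).choose_spec.1
          have hc0 : 0 ≤ c := h0all c (by rw [hcse]; simp)
          obtain ⟨hrmem, hrle, hrall⟩ :=
            pv_omin_min cs' (fun q hq => h0all q (by rw [hcse]; simp [hq])) c hc0
          have hrincs : cs'.foldl pvOmin c ∈ cs := by rw [hcse]; exact hrmem
          have hrlej : cs'.foldl pvOmin c ≤ (j : Int) := by
            rw [hcse] at hmem0
            rcases List.mem_cons.mp hmem0 with h | h
            · omega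
            · exact le_trans (hrall _ h) (le_refl _)
          have hjler : (j : Int) ≤ cs'.foldl pvOmin c := hlb _ hrincs
          simp only [zero_add]
          omega
  · rw [if_pos (by simpa using hmem), if_pos (by simpa using hmem)]
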